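-- pv_equiv track=rewrite | github.com/ChopinNo3Op9/Coding-Challenge | select 7.py | select_7
-- ===== SOURCE A (Python) =====
-- def contain_7 (n):
--     nlist = [int(s) for s in str(n)]
--     if 7 in nlist:
--         return True
--     return False
--
-- def select_7(r):
--     count = 0
--
--     for i in range(1, r+1):
--         if contain_7(i):
--             count += 1
--         elif i % 7 == 0:
--             count += 1
--     return count
-- ===== SOURCE B (Python) =====
-- def _contains7(q):
--     while q > 0:
--         if q % 10 == 7:
--             return True
--         q //= 10
--     return False
--
--
-- def _no7_mod_counts(m):
--     # c[j] = number of n in [0, m] with no digit 7 and n % 7 == j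
--     if m < 0:
--         return [0] * 7
--     q, d = divmod(m, 10)
--     prev = _no7_mod_counts(q - 1)
--     # a full decade below 10*q: n = 10*a + e, a <= q-1, e in 0..9, e != 7;
--     # n % 7 == j  iff  a % 7 == (j - e) * 5 % 7   (5 is the inverse of 10 mod 7)
--     full = [sum(prev[(j - e) * 5 % 7] for e in range(10) if e != 7)
--             for j in range(7)]
--     if _contains7(q):
--         return full
--     return [full[j] + sum(1 for e in range(d + 1)
--                           if e != 7 and (3 * q + e) % 7 == j)
--             for j in range(7)]
--
--
-- def select_7(r):
--     if r < 1:
--         return 0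
--     c = _no7_mod_counts(r)
--     return r - sum(c[1:])
-- ===== Notes on version B (the rewrite author's own statement) =====
-- stated objective: faster
-- what changed: A tests every integer in 1..r one by one (converting each to a string); B counts in O(log r) with a digit recursion that keeps, per residue mod 7, how many 7-free numbers lie below the bound, and subtracts.
import Mathlib
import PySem

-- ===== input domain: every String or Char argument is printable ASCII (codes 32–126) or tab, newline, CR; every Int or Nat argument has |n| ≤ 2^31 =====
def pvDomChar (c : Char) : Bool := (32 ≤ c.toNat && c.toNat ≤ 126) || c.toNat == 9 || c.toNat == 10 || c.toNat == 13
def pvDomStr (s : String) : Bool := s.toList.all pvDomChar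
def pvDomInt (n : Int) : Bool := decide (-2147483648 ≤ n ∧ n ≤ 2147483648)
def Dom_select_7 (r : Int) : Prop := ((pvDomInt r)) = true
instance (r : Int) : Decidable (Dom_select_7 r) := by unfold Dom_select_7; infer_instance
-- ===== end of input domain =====

-- B replaces A's per-number scan of 1..r by a digit-position recursion that keeps, for each
-- residue mod 7, the count of 7-free numbers below the bound (objective: faster, O(log r)).

-- ===== PORT A =====
-- contain_7: nlist = [int(s) for s in str(n)]; int on a 1-char string is ofChars? [c].
-- `.getD 0` stands in for int()'s ValueError, which is unreachable here: contain_7 is only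
-- applied to i ≥ 1, whose str(i) consists of digit characters only.
def contain_7 (n : Int) : Bool :=
  let nlist : List Int := (PySem.Int.toStr n).toList.map (fun c => (PySem.Int.ofChars? [c]).getD 0)
  if 7 ∈ nlist then true else false

def select_7 (r : Int) : Int :=
  (PySem.List.pyRange 1 (r + 1) 1).foldl
    (fun count i =>
      if contain_7 i then count + 1
      else if PySem.Int.mod i 7 = 0 then count + 1
      else count) 0

-- ===== PORT B =====
-- while q > 0: if q % 10 == 7: return True; q //= 10
def contains7Alt (q : Int) : Bool :=
  if h : 0 < q then
    if PySem.Int.mod q 10 = 7 then true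
    else contains7Alt (PySem.Int.floordiv q 10)
  else false
termination_by q.toNat
decreasing_by
  rw [PySem.Int.floordiv_eq_ediv_of_pos (by norm_num)]
  omega

-- _no7_mod_counts(m): c[j] = #{n in [0,m] : no digit 7 in n, n % 7 = j}
def no7ModCounts (m : Int) : List Int :=
  if h : m < 0 then List.replicate 7 0
  else
    let q := PySem.Int.floordiv m 10
    let d := PySem.Int.mod m 10
    let prev := no7ModCounts (q - 1)
    let full := (PySem.List.pyRange 0 7 1).map (fun j =>
      (((PySem.List.pyRange 0 10 1).filter (fun e => e != 7)).map
        (fun e => PySem.List.pyGetD prev (PySem.Int.mod ((j - e) * 5) 7) 0)).sum)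
    if contains7Alt q then full
    else (PySem.List.pyRange 0 7 1).map (fun j =>
      PySem.List.pyGetD full j 0 +
      (((PySem.List.pyRange 0 (d + 1) 1).filter
          (fun e => e != 7 && decide (PySem.Int.mod (3 * q + e) 7 = j))).map
        (fun _ => (1 : Int))).sum)
termination_by (m + 1).toNat
decreasing_by
  rw [PySem.Int.floordiv_eq_ediv_of_pos (by norm_num)]
  omega

def select_7_alt (r : Int) : Int :=
  if r < 1 then 0
  else
    let c := no7ModCounts r
    -- sum(c[1:]) : the slice c[1:] is PySem.List.slice c (some 1) none
    r - (PySem.List.slice c (some 1) none).sum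

-- ===== PRECONDITION & SPEC =====
def Spec_select_7 (r : Int) (out : Int) : Prop := out = select_7_alt r
instance (r : Int) (out : Int) : Decidable (Spec_select_7 r out) := by unfold Spec_select_7; infer_instance

-- ===== CLAIM (what is proved, stated in full; the proofs are below) =====
def Claim_equal_select_7 : Prop := ∀ (r : Int), Dom_select_7 r → Spec_select_7 r (select_7 r)

-- ===== LEMMAS AND PROOFS =====

-- spec-side: n has a decimal digit 7
def has7N (n : ℕ) : Bool :=
  if n = 0 then false else (n % 10 == 7) || has7N (n / 10)
termination_by n
decreasing_by omega

-- spec-side counter: #{n < M : no digit 7, n % 7 = j}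
def cnt (M j : ℕ) : ℕ :=
  ((List.range M).map (fun n => if has7N n = false ∧ n % 7 = j then 1 else 0)).sum

lemma cnt_add (M K j : ℕ) :
    cnt (M + K) j = cnt M j +
      ((List.range K).map (fun t => if has7N (M + t) = false ∧ (M + t) % 7 = j then 1 else 0)).sum := by
  induction K with
  | zero => simp [cnt]
  | succ k ih =>
    rw [show M + (k + 1) = (M + k) + 1 by ring]
    unfold cnt
    rw [List.range_succ, List.range_succ] at *
    simp only [List.map_append, List.sum_append, List.map_cons, List.map_nil, List.sum_cons,
      List.sum_nil] at *
    unfold cnt at ih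
    omega

lemma has7_ten (a e : ℕ) (he : e < 10) : has7N (10 * a + e) = ((e == 7) || has7N a) := by
  by_cases h0 : 10 * a + e = 0
  · have ha : a = 0 := by omega
    have hee : e = 0 := by omega
    subst ha; subst hee
    simp [has7N]
  · rw [has7N]
    have h1 : (10 * a + e) % 10 = e := by omega
    have h2 : (10 * a + e) / 10 = a := by omega
    simp only [h1, h2, if_neg h0]

lemma contains7Alt_eq (N : ℕ) : contains7Alt (N : ℤ) = has7N N := by
  induction N using Nat.strong_induction_on with
  | _ N ih =>
    rw [contains7Alt, has7N]
    by_cases h0 : N = 0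
    · subst h0; norm_num
    · have hpos : 0 < (N : ℤ) := by exact_mod_cast Nat.pos_of_ne_zero h0
      rw [dif_pos hpos]
      have hm : PySem.Int.mod (N : ℤ) 10 = ((N % 10 : ℕ) : ℤ) := by
        exact_mod_cast PySem.Int.mod_natCast N 10
      have hd : PySem.Int.floordiv (N : ℤ) 10 = ((N / 10 : ℕ) : ℤ) := by
        exact_mod_cast PySem.Int.floordiv_natCast N 10
      rw [hm, hd, ih (N / 10) (by omega)]
      have hcast : ((N : ℤ) % 10 = 7) ↔ (N % 10 = 7) := by omega
      by_cases h7 : N % 10 = 7 <;> simp [h7, h0, hcast]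

lemma fd (m : ℕ) (h : m < 10) : (PySem.Int.ofChars? [Nat.digitChar m]).getD 0 = (m : ℤ) := by
  interval_cases m <;> decide

lemma mem_tdc (fuel n : ℕ) (ds : List Char) (h : n < fuel) :
    ((7 : ℤ) ∈ (Nat.toDigitsCore 10 fuel n ds).map (fun c => (PySem.Int.ofChars? [c]).getD 0)) ↔
      (has7N n = true ∨ (7 : ℤ) ∈ ds.map (fun c => (PySem.Int.ofChars? [c]).getD 0)) := by
  induction fuel generalizing n ds with
  | zero => omega
  | succ f ih =>
    rw [Nat.toDigitsCore]
    have hmem : ∀ l : List Char, (7 : ℤ) ∈ ((n % 10).digitChar :: l).map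
        (fun c => (PySem.Int.ofChars? [c]).getD 0) ↔
        (n % 10 = 7 ∨ (7 : ℤ) ∈ l.map (fun c => (PySem.Int.ofChars? [c]).getD 0)) := by
      intro l
      simp only [List.map_cons, List.mem_cons, fd (n % 10) (by omega)]
      constructor
      · rintro (hx | hx)
        · left; exact_mod_cast hx.symm
        · right; exact hx
      · rintro (hx | hx)
        · left; exact_mod_cast hx.symm
        · right; exact hx
    by_cases h10 : n / 10 = 0
    · rw [if_pos h10]
      rw [hmem ds, has7N]
      by_cases h0 : n = 0
      · subst h0; simp
      · rw [if_neg h0, h10]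
        have hz : has7N 0 = false := by rw [has7N]; simp
        rw [hz]
        constructor
        · rintro (hx | hx)
          · left; simp [hx]
          · right; exact hx
        · rintro (hx | hx)
          · left; simpa using hx
          · right; exact hx
    · rw [if_neg h10]
      rw [ih (n / 10) _ (by omega), hmem ds]
      have hn : has7N n = ((n % 10 == 7) || has7N (n / 10)) := by
        rw [has7N, if_neg (show ¬ n = 0 by omega)]
      rw [hn]
      simp only [Bool.or_eq_true, beq_iff_eq]
      tauto

lemma contain_7_eq (N : ℕ) : contain_7 (N : ℤ) = has7N N := by
  unfold contain_7
  have h1 : (PySem.Int.toStr (N : ℤ)).toList = Nat.toDigits 10 N := by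
    rw [PySem.Int.toList_toStr]
    unfold PySem.Int.toChars
    rw [if_neg (by exact_mod_cast Nat.not_lt_zero N)]
    simp
  rw [h1]
  unfold Nat.toDigits
  have := mem_tdc (N + 1) N [] (by omega)
  by_cases h : has7N N = true
  · rw [if_pos (this.mpr (Or.inl h)), h]
  · have hn : ¬ (7 : ℤ) ∈ (Nat.toDigitsCore 10 (N + 1) N []).map
        (fun c => (PySem.Int.ofChars? [c]).getD 0) := by
      intro hmem
      rcases this.mp hmem with h' | h'
      · exact h h'
      · simp at h'
    simp only [List.mem_map] at hn ⊢
    rw [if_neg (by simpa using hn)]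
    simp [Bool.not_eq_true] at h
    rw [h]

lemma cnt_succ (M j : ℕ) :
    cnt (M + 1) j = cnt M j + (if has7N M = false ∧ M % 7 = j then 1 else 0) := by
  have := cnt_add M 1 j
  simpa using this

lemma sum_ind (l : List ℕ) (P : ℕ → Prop) [DecidablePred P] :
    (l.map (fun e => if P e then 1 else 0)).sum = (l.filter (fun e => decide (P e))).length := by
  induction l with
  | nil => simp
  | cons a t ih =>
    by_cases h : P a <;> simp [h, ih] <;> omega

-- the mod-7 bookkeeping of one full decade, checked for all residues x and targets j
lemma dec_core (x j : Fin 7) :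
    ((List.range 10).map (fun e => if e ≠ 7 ∧ (3 * (x : ℕ) + e) % 7 = (j : ℕ) then 1 else 0)).sum =
      (((List.range 10).filter (fun e => e ≠ 7)).map
        (fun e => if (x : ℕ) = (5 * (j : ℕ) + 2 * e) % 7 then 1 else 0)).sum := by
  revert x j
  decide

-- cnt over full decades: 10*Q numbers below, regrouped through the inverse of 10 mod 7
lemma la (Q j : ℕ) (hj : j < 7) :
    cnt (10 * Q) j =
      (((List.range 10).filter (fun e => e ≠ 7)).map (fun e => cnt Q ((5 * j + 2 * e) % 7))).sum := by
  induction Q with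
  | zero => simp [cnt]
  | succ q ih =>
    rw [show 10 * (q + 1) = 10 * q + 10 by ring, cnt_add, ih]
    have hR : ∀ e ∈ (List.range 10).filter (fun e => e ≠ 7),
        cnt (q + 1) ((5 * j + 2 * e) % 7) =
          cnt q ((5 * j + 2 * e) % 7) +
            (if has7N q = false ∧ q % 7 = (5 * j + 2 * e) % 7 then 1 else 0) := by
      intro e _he
      exact cnt_succ q _
    rw [List.map_congr_left hR, List.sum_map_add]
    have hL : ∀ t ∈ List.range 10,
        (if has7N (10 * q + t) = false ∧ (10 * q + t) % 7 = j then 1 else 0) =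
          (if t ≠ 7 ∧ has7N q = false ∧ (3 * (q % 7) + t) % 7 = j then 1 else 0) := by
      intro t ht
      have ht10 : t < 10 := List.mem_range.mp ht
      rw [has7_ten q t ht10]
      have hmod : (10 * q + t) % 7 = (3 * (q % 7) + t) % 7 := by omega
      rw [hmod]
      by_cases h7 : t = 7
      · subst h7; simp
      · by_cases hq : has7N q <;> simp [h7, hq]
    rw [List.map_congr_left hL]
    by_cases hq : has7N q
    · have z1 : ∀ t ∈ List.range 10,
          (if t ≠ 7 ∧ has7N q = false ∧ (3 * (q % 7) + t) % 7 = j then 1 else 0) = 0 := by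
        intro t _; simp [hq]
      have z2 : ∀ e ∈ (List.range 10).filter (fun e => e ≠ 7),
          (if has7N q = false ∧ q % 7 = (5 * j + 2 * e) % 7 then 1 else 0) = 0 := by
        intro e _; simp [hq]
      rw [List.map_congr_left z1, List.map_congr_left z2]
      simp
    · simp only [Bool.not_eq_true] at hq
      have e1 : ∀ t ∈ List.range 10,
          (if t ≠ 7 ∧ has7N q = false ∧ (3 * (q % 7) + t) % 7 = j then 1 else 0) =
            (if t ≠ 7 ∧ (3 * (q % 7) + t) % 7 = j then 1 else 0) := by
        intro t _; simp [hq]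
      have e2 : ∀ e ∈ (List.range 10).filter (fun e => e ≠ 7),
          (if has7N q = false ∧ q % 7 = (5 * j + 2 * e) % 7 then 1 else 0) =
            (if q % 7 = (5 * j + 2 * e) % 7 then 1 else 0) := by
        intro e _; simp [hq]
      rw [List.map_congr_left e1, List.map_congr_left e2]
      have := dec_core ⟨q % 7, by omega⟩ ⟨j, hj⟩
      simpa using this

-- value of the `full` list built by the port of B, at index j
lemma full_val (prev : List ℤ) (v : ℕ → ℕ)
    (hprev : ∀ i : ℕ, i < 7 → PySem.List.pyGetD prev (i : ℤ) 0 = (v i : ℤ))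
    (j : ℕ) (hj : j < 7) :
    PySem.List.pyGetD ((PySem.List.pyRange 0 7 1).map (fun jj =>
        (((PySem.List.pyRange 0 10 1).filter (fun e => e != 7)).map
          (fun e => PySem.List.pyGetD prev (PySem.Int.mod ((jj - e) * 5) 7) 0)).sum)) (j : ℤ) 0
      = ((((List.range 10).filter (fun e => e ≠ 7)).map (fun e => v ((5 * j + 2 * e) % 7))).sum : ℤ) := by
  rw [PySem.List.pyGetD_map_pyRange_of_nonneg _ _ _ _ (by positivity) (by exact_mod_cast hj)]
  have hE : (PySem.List.pyRange 0 10 1).filter (fun e => e != 7)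
      = List.map (fun e : ℕ => (e : ℤ)) ((List.range 10).filter (fun e => e ≠ 7)) := by decide
  rw [hE, List.map_map]
  rw [Nat.cast_list_sum, List.map_map]
  refine congrArg List.sum (List.map_congr_left ?_)
  intro e he
  have he10 : e < 10 := List.mem_range.mp (List.mem_of_mem_filter he)
  have hT : PySem.Int.mod (((j : ℤ) - (e : ℤ)) * 5) 7 = (((5 * j + 2 * e) % 7 : ℕ) : ℤ) := by
    rw [PySem.Int.mod_eq_emod_of_pos (by norm_num)]
    push_cast
    omega
  simp only [Function.comp]
  rw [hT, hprev ((5 * j + 2 * e) % 7) (by omega)]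

-- value of the tail correction of the port of B
lemma tail_val (Q D j : ℕ) (hD : D < 10) (hj : j < 7)
    (hQ : has7N Q = false) :
    (((PySem.List.pyRange 0 ((D : ℤ) + 1) 1).filter
        (fun e => e != 7 && decide (PySem.Int.mod (3 * (Q : ℤ) + e) 7 = (j : ℤ)))).map
      (fun _ => (1 : ℤ))).sum
      = ((((List.range (D + 1)).map
            (fun t => if has7N (10 * Q + t) = false ∧ (10 * Q + t) % 7 = j then 1 else 0)).sum : ℕ) : ℤ) := by
  rw [show ((D : ℤ) + 1) = ((D + 1 : ℕ) : ℤ) by push_cast; ring, PySem.List.pyRange_zero_natCast]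
  rw [List.filter_map, List.map_map]
  rw [sum_ind]
  simp only [Function.comp_def]
  have hcong : ∀ t ∈ List.range (D + 1),
      (((t : ℤ) != 7 && decide (PySem.Int.mod (3 * (Q : ℤ) + (t : ℤ)) 7 = (j : ℤ))))
        = decide (has7N (10 * Q + t) = false ∧ (10 * Q + t) % 7 = j) := by
    intro t ht
    have ht10 : t < D + 1 := List.mem_range.mp ht
    have h7 : has7N (10 * Q + t) = ((t == 7) || has7N Q) := has7_ten Q t (by omega)
    have hm : PySem.Int.mod (3 * (Q : ℤ) + (t : ℤ)) 7 = (j : ℤ) ↔ (10 * Q + t) % 7 = j := by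
      rw [PySem.Int.mod_eq_emod_of_pos (by norm_num)]
      omega
    by_cases ht7 : t = 7
    · subst ht7; simp [h7]
    · have : ((t : ℤ) != 7) = true := by
        simp only [bne_iff_ne, ne_eq]
        exact_mod_cast ht7
      simp only [h7, hQ, this, Bool.true_and, Bool.or_false,
        decide_eq_decide]
      rw [PySem.Int.mod_eq_emod_of_pos (by norm_num)]
      constructor
      · intro hx; constructor
        · simp [ht7]
        · omega
      · intro hx; omega
  rw [List.filter_congr hcong]
  simp

lemma no7_len (m : ℤ) : (no7ModCounts m).length = 7 := by
  rw [no7ModCounts]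
  by_cases h : m < 0
  · rw [dif_pos h]; simp
  · rw [dif_neg h]
    by_cases hc : contains7Alt (PySem.Int.floordiv m 10) = true
    · rw [if_pos hc, List.length_map]
      decide
    · rw [if_neg hc, List.length_map]
      decide

lemma list7 (l : List ℤ) (h : l.length = 7) :
    l = [l.getD 0 0, l.getD 1 0, l.getD 2 0, l.getD 3 0, l.getD 4 0, l.getD 5 0, l.getD 6 0] := by
  match l, h with
  | [a, b, c, d, e, f, g], _ => simp

-- the counts computed by B's recursion are exactly the `cnt` counters
lemma no7_correct (m : ℕ) : ∀ j : ℕ, j < 7 →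
    PySem.List.pyGetD (no7ModCounts (m : ℤ)) (j : ℤ) 0 = (cnt (m + 1) j : ℤ) := by
  induction m using Nat.strong_induction_on with
  | _ m ih =>
    intro j hj
    rw [no7ModCounts]
    rw [dif_neg (not_lt.mpr (Int.natCast_nonneg m))]
    have hq : PySem.Int.floordiv (m : ℤ) 10 = ((m / 10 : ℕ) : ℤ) := by
      exact_mod_cast PySem.Int.floordiv_natCast m 10
    have hd : PySem.Int.mod (m : ℤ) 10 = ((m % 10 : ℕ) : ℤ) := by
      exact_mod_cast PySem.Int.mod_natCast m 10
    rw [hq, hd]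
    have hprev : ∀ i : ℕ, i < 7 →
        PySem.List.pyGetD (no7ModCounts (((m / 10 : ℕ) : ℤ) - 1)) (i : ℤ) 0
          = (cnt (m / 10) i : ℤ) := by
      intro i hi
      by_cases hQ0 : m / 10 = 0
      · rw [hQ0]
        rw [no7ModCounts, dif_pos (by norm_num)]
        have hz : cnt 0 i = 0 := by simp [cnt]
        rw [hz]
        simp only [PySem.List.pyGetD_natCast, Nat.cast_zero]
        interval_cases i <;> rfl
      · rw [show (((m / 10 : ℕ) : ℤ) - 1) = ((m / 10 - 1 : ℕ) : ℤ) by omega]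
        rw [ih (m / 10 - 1) (by omega) i hi]
        rw [show m / 10 - 1 + 1 = m / 10 by omega]
    have hcc : contains7Alt ((m / 10 : ℕ) : ℤ) = has7N (m / 10) := contains7Alt_eq (m / 10)
    by_cases hQ7 : has7N (m / 10) = true
    · rw [if_pos (by rw [hcc]; exact hQ7)]
      rw [full_val _ (fun i => cnt (m / 10) i) hprev j hj]
      congr 1
      rw [show m + 1 = 10 * (m / 10) + (m % 10 + 1) by omega, cnt_add, la (m / 10) j hj]
      have z : ∀ t ∈ List.range (m % 10 + 1),
          (if has7N (10 * (m / 10) + t) = false ∧ (10 * (m / 10) + t) % 7 = j then 1 else 0) = 0 := by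
        intro t ht
        have ht10 : t < m % 10 + 1 := List.mem_range.mp ht
        rw [has7_ten (m / 10) t (by omega)]
        simp [hQ7]
      rw [List.map_congr_left z]
      simp
    · rw [if_neg (by rw [hcc]; exact hQ7)]
      simp only [Bool.not_eq_true] at hQ7
      rw [PySem.List.pyGetD_map_pyRange_of_nonneg _ _ _ _ (Int.natCast_nonneg j) (by exact_mod_cast hj)]
      rw [full_val _ (fun i => cnt (m / 10) i) hprev j hj,
        tail_val (m / 10) (m % 10) j (by omega) hj hQ7]
      rw [show m + 1 = 10 * (m / 10) + (m % 10 + 1) by omega, cnt_add, la (m / 10) j hj]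
      push_cast
      ring

-- A's loop as a sum of 0/1 indicators
lemma Afold (l : List ℤ) (acc : ℤ) :
    l.foldl (fun count i =>
        if contain_7 i then count + 1
        else if PySem.Int.mod i 7 = 0 then count + 1
        else count) acc
      = acc + (l.map (fun i =>
          if contain_7 i = true ∨ PySem.Int.mod i 7 = 0 then (1 : ℤ) else 0)).sum := by
  induction l generalizing acc with
  | nil => simp
  | cons a t ihl =>
    simp only [List.foldl_cons, List.map_cons, List.sum_cons]
    rw [ihl]
    by_cases h1 : contain_7 a
    · rw [if_pos h1, if_pos (Or.inl h1)]; ring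
    · rw [if_neg h1]
      by_cases h2 : PySem.Int.mod a 7 = 0
      · rw [if_pos h2, if_pos (Or.inr h2)]; ring
      · rw [if_neg h2, if_neg (by tauto)]; ring

-- A's per-number test, as a predicate on ℕ
def pN (n : ℕ) : Bool := has7N n || (n % 7 == 0)

lemma final_count (R : ℕ) :
    ((List.range R).map (fun k => if pN (1 + k) = true then (1 : ℕ) else 0)).sum
      + (cnt (R + 1) 1 + cnt (R + 1) 2 + cnt (R + 1) 3 + cnt (R + 1) 4 + cnt (R + 1) 5
          + cnt (R + 1) 6) = R := by
  induction R with
  | zero =>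
    have hz0 : has7N 0 = false := by rw [has7N]; simp
    simp [cnt, List.range_succ, hz0]
  | succ R ihR =>
    rw [List.range_succ, List.map_append, List.sum_append]
    rw [cnt_succ (R + 1) 1, cnt_succ (R + 1) 2, cnt_succ (R + 1) 3, cnt_succ (R + 1) 4,
      cnt_succ (R + 1) 5, cnt_succ (R + 1) 6]
    simp only [List.map_cons, List.map_nil, List.sum_cons, List.sum_nil]
    rw [show (1 : ℕ) + R = R + 1 by ring]
    by_cases h7 : has7N (R + 1) = true
    · rw [if_pos (show pN (R + 1) = true by simp [pN, h7])]
      have z : ∀ jj : ℕ, (if has7N (R + 1) = false ∧ (R + 1) % 7 = jj then 1 else 0) = 0 := by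
        intro jj; simp [h7]
      rw [z 1, z 2, z 3, z 4, z 5, z 6]
      omega
    · simp only [Bool.not_eq_true] at h7
      have w : ∀ jj : ℕ, (if has7N (R + 1) = false ∧ (R + 1) % 7 = jj then 1 else 0)
          = (if (R + 1) % 7 = jj then (1 : ℕ) else 0) := by
        intro jj; simp [h7]
      rw [w 1, w 2, w 3, w 4, w 5, w 6]
      by_cases h0 : (R + 1) % 7 = 0
      · rw [if_pos (show pN (R + 1) = true by simp [pN, h7, h0])]
        split_ifs <;> omega
      · rw [if_neg (show ¬ pN (R + 1) = true by simp [pN, h7, h0])]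
        split_ifs <;> omega

theorem select_7_spec : Claim_equal_select_7 := by
  intro r _dom
  unfold Spec_select_7 select_7 select_7_alt
  by_cases hr : r < 1
  · rw [if_pos hr, PySem.List.pyRange_one_eq_nil (by omega)]
    simp
  · rw [if_neg hr]
    dsimp only
    obtain ⟨R, rfl⟩ : ∃ R : ℕ, r = (R : ℤ) := ⟨r.toNat, by omega⟩
    -- B's value
    have hlen := no7_len (R : ℤ)
    have hslice : PySem.List.slice (no7ModCounts (R : ℤ)) (some 1) none
        = (no7ModCounts (R : ℤ)).drop 1 := by
      rw [show (1 : ℤ) = ((1 : ℕ) : ℤ) from rfl, PySem.List.slice_from_natCast]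
    have hget : ∀ j : ℕ, j < 7 →
        (no7ModCounts (R : ℤ)).getD j 0 = (cnt (R + 1) j : ℤ) := by
      intro j hj
      have := no7_correct R j hj
      rwa [PySem.List.pyGetD_natCast] at this
    have hB : (PySem.List.slice (no7ModCounts (R : ℤ)) (some 1) none).sum
        = (cnt (R + 1) 1 : ℤ) + cnt (R + 1) 2 + cnt (R + 1) 3 + cnt (R + 1) 4 + cnt (R + 1) 5
          + cnt (R + 1) 6 := by
      rw [hslice]
      rw [list7 _ hlen]
      simp only [List.drop_succ_cons, List.drop_zero, List.sum_cons, List.sum_nil]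
      rw [hget 1 (by omega), hget 2 (by omega), hget 3 (by omega), hget 4 (by omega),
        hget 5 (by omega), hget 6 (by omega)]
      ring
    rw [hB]
    -- A's value
    rw [Afold, PySem.List.pyRange_one]
    rw [show ((R : ℤ) + 1 - 1).toNat = R by omega]
    rw [List.map_map]
    have hA : ∀ k ∈ List.range R,
        ((fun i => if contain_7 i = true ∨ PySem.Int.mod i 7 = 0 then (1 : ℤ) else 0) ∘
          fun k : ℕ => (1 : ℤ) + (k : ℤ)) k
          = ((fun k : ℕ => if pN (1 + k) = true then (1 : ℕ) else 0) k : ℤ) := by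
      intro k _
      simp only [Function.comp_apply]
      have hc : (1 : ℤ) + (k : ℤ) = ((1 + k : ℕ) : ℤ) := by push_cast; ring
      rw [hc, contain_7_eq (1 + k)]
      have hm : PySem.Int.mod ((1 + k : ℕ) : ℤ) 7 = (((1 + k) % 7 : ℕ) : ℤ) := by
        exact_mod_cast PySem.Int.mod_natCast (1 + k) 7
      rw [hm]
      by_cases h1 : has7N (1 + k) = true
      · simp [pN, h1]
      · simp only [Bool.not_eq_true] at h1
        by_cases h2 : (1 + k) % 7 = 0
        · simp [pN, h1, h2]
        · have hndvd : ¬ (7 : ℤ) ∣ (1 + (k : ℤ)) := by omega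
          simp [pN, h1, h2, hndvd]
    rw [List.map_congr_left hA]
    have hcast : ((List.range R).map (fun k : ℕ =>
        (((fun k : ℕ => if pN (1 + k) = true then (1 : ℕ) else 0) k : ℕ) : ℤ))).sum
        = (((List.range R).map (fun k : ℕ => if pN (1 + k) = true then (1 : ℕ) else 0)).sum : ℤ) := by
      rw [Nat.cast_list_sum, List.map_map]
      rfl
    rw [hcast]
    have := final_count R
    omega
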